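-- pv_equiv track=rewrite | github.com/kidlestar/MOE | preprocessing.py | get_sibs
-- ===== SOURCE A (Python) =====
-- def get_sibs(sequence):
--     sibs = [-1] * (len(sequence) + 1)
--     heads = [0] + [int(i) for i in sequence]
--
--     for i in range(1, len(heads)):
--         hi = heads[i]
--         for j in range(i + 1, len(heads)):
--             hj = heads[j]
--             di, dj = hi - i, hj - j
--             if hi >= 0 and hj >= 0 and hi == hj and di * dj > 0:
--                 if abs(di) > abs(dj):
--                     sibs[i] = j
--                 else:
--                     sibs[j] = i
--                 break
--     return sibs
-- ===== SOURCE B (Python) =====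
-- def get_sibs(sequence):
--     n = len(sequence)
--     sibs = [-1] * (n + 1)
--     nxt = {}    # (head, side) -> nearest index to the right seen so far
--     match = {}  # i -> nearest j > i with the same (head, side)
--     for i in range(n, 0, -1):
--         h = int(sequence[i - 1])
--         if h < 0 or h == i:
--             continue
--         key = (h, h > i)
--         if key in nxt:
--             match[i] = nxt[key]
--         nxt[key] = i
--     for i in range(1, n + 1):
--         j = match.get(i)
--         if j is not None:
--             h = int(sequence[i - 1])
--             if abs(h - i) > abs(h - j):
--                 sibs[i] = j
--             else:
--                 sibs[j] = i
--     return sibs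
-- ===== Notes on version B (the rewrite author's own statement) =====
-- stated objective: faster
-- what changed: Replaced the quadratic scan-for-first-sibling inner loop by a backward pass that hash-groups indices by (head, side) to record each index's nearest same-key successor, then a single forward pass applies the writes; A's inner break-scan disappears.
import Mathlib
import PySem

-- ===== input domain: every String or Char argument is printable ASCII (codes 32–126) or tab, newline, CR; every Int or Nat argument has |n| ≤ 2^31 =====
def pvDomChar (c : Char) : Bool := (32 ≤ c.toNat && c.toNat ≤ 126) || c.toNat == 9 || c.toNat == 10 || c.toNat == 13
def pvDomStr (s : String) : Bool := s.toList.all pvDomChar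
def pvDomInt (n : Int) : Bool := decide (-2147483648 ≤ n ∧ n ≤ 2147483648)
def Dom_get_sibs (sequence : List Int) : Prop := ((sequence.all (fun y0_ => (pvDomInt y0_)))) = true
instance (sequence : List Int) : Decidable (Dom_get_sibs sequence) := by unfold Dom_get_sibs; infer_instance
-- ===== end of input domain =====

-- B replaces A's quadratic break-scan for the first same-(head,side) successor by a backward
-- hash-map pass recording each index's nearest same-key successor, then one forward pass of writes
-- (objective: faster, O(n) vs O(n^2); measured asymptotically faster).


-- ===== PORT A =====
-- the inner 'for j in range(i+1, len(heads))' loop with its break: recursion stops at the first match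
def innerA (heads : List Int) (i hi : Int) (sibs : List Int) : List Int → List Int
  | [] => sibs
  | j :: js =>
    if 0 ≤ hi ∧ 0 ≤ PySem.List.pyGetD heads j 0 ∧ hi = PySem.List.pyGetD heads j 0 ∧
        (hi - i) * (PySem.List.pyGetD heads j 0 - j) > 0 then
      if |hi - i| > |PySem.List.pyGetD heads j 0 - j| then PySem.List.pySetD sibs i j
      else PySem.List.pySetD sibs j i
    else innerA heads i hi sibs js

def get_sibs (sequence : List Int) : List Int :=
  let sibs : List Int := List.replicate (sequence.length + 1) (-1)
  let heads : List Int := 0 :: sequence.map (fun i => i)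
  (PySem.List.pyRange 1 (heads.length : Int) 1).foldl
    (fun sibs i =>
      innerA heads i (PySem.List.pyGetD heads i 0) sibs
        (PySem.List.pyRange (i + 1) (heads.length : Int) 1))
    sibs

-- ===== PORT B =====
-- backward-pass body: 'nxt' = nearest index to the right per (head, side) key; 'match[i]' = nearest same-key successor
def bStep1 (sequence : List Int) (st : PySem.Dict (Int × Bool) Int × PySem.Dict Int Int)
    (i : Int) : PySem.Dict (Int × Bool) Int × PySem.Dict Int Int :=
  if PySem.List.pyGetD sequence (i - 1) 0 < 0 ∨ PySem.List.pyGetD sequence (i - 1) 0 = i then st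
  else
    (st.1.insert (PySem.List.pyGetD sequence (i - 1) 0, decide (PySem.List.pyGetD sequence (i - 1) 0 > i)) i,
      match st.1.get? (PySem.List.pyGetD sequence (i - 1) 0, decide (PySem.List.pyGetD sequence (i - 1) 0 > i)) with
      | some j => st.2.insert i j
      | none => st.2)

-- forward-pass body: apply the write rule to the pair (i, match[i])
def bStep2 (sequence : List Int) (mtch : PySem.Dict Int Int) (sibs : List Int) (i : Int) : List Int :=
  match mtch.get? i with
  | some j =>
    if |PySem.List.pyGetD sequence (i - 1) 0 - i| > |PySem.List.pyGetD sequence (i - 1) 0 - j| then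
      PySem.List.pySetD sibs i j
    else PySem.List.pySetD sibs j i
  | none => sibs

def get_sibs_alt (sequence : List Int) : List Int :=
  let n : Int := (sequence.length : Int)
  let mtch :=
    ((PySem.List.pyRange n 0 (-1)).foldl (bStep1 sequence)
      (PySem.Dict.empty, PySem.Dict.empty)).2
  (PySem.List.pyRange 1 (n + 1) 1).foldl (bStep2 sequence mtch)
    (List.replicate (sequence.length + 1) (-1))

-- ===== PRECONDITION & SPEC =====
def Spec_get_sibs (sequence : List Int) (out : List Int) : Prop := out = get_sibs_alt sequence
instance (sequence : List Int) (out : List Int) : Decidable (Spec_get_sibs sequence out) := by unfold Spec_get_sibs; infer_instance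

-- ===== CLAIM (what is proved, stated in full; the proofs are below) =====
def Claim_equal_get_sibs : Prop := ∀ (sequence : List Int), Dom_get_sibs sequence → Spec_get_sibs sequence (get_sibs sequence)

-- ===== LEMMAS AND PROOFS =====

-- the (head, side) key of index i, or none if i can never participate in a sibling pair
def keyOf (s : List Int) (i : Int) : Option (Int × Bool) :=
  if PySem.List.pyGetD s (i - 1) 0 < 0 ∨ PySem.List.pyGetD s (i - 1) 0 = i then none
  else some (PySem.List.pyGetD s (i - 1) 0, decide (PySem.List.pyGetD s (i - 1) 0 > i))

-- first index j in [a, n+1) whose key is `some k`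
def firstIdx (s : List Int) (a : Int) (k : Int × Bool) : Option Int :=
  (PySem.List.pyRange a ((s.length : Int) + 1) 1).find? (fun j => keyOf s j == some k)

lemma head_bridge (s : List Int) (i : Int) (h1 : 1 ≤ i) :
    PySem.List.pyGetD (0 :: s) i 0 = PySem.List.pyGetD s (i - 1) 0 := by
  rw [PySem.List.pyGetD_of_nonneg (0 :: s) 0 (by omega),
    PySem.List.pyGetD_of_nonneg s 0 (by omega)]
  have : i.toNat = (i - 1).toNat + 1 := by omega
  rw [this]
  rfl

-- A's pair condition is exactly "both indices carry the same defined (head, side) key"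
lemma cond_iff_key (a b i j : Int) :
    (0 ≤ a ∧ 0 ≤ b ∧ a = b ∧ (a - i) * (b - j) > 0)
    ↔ (∃ k, (if a < 0 ∨ a = i then none else some (a, decide (a > i))) = some k ∧
        (if b < 0 ∨ b = j then none else some (b, decide (b > j))) = some k) := by
  constructor
  · rintro ⟨h0, h0', heq, hp⟩
    rw [gt_iff_lt, mul_pos_iff] at hp
    subst heq
    refine ⟨(a, decide (a > i)), ?_, ?_⟩
    · rw [if_neg (by omega)]
    · rw [if_neg (by omega)]
      have : decide (a > j) = decide (a > i) := decide_eq_decide.2 (by omega)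
      rw [this]
  · rintro ⟨k, hk1, hk2⟩
    by_cases c1 : a < 0 ∨ a = i
    · rw [if_pos c1] at hk1; exact absurd hk1 (by simp)
    by_cases c2 : b < 0 ∨ b = j
    · rw [if_pos c2] at hk2; exact absurd hk2 (by simp)
    rw [if_neg c1] at hk1
    rw [if_neg c2] at hk2
    have h12 := hk1.trans hk2.symm
    rw [Option.some.injEq, Prod.mk.injEq] at h12
    have hiff := decide_eq_decide.1 h12.2
    have hab : a = b := h12.1
    refine ⟨by omega, by omega, hab, ?_⟩
    rw [gt_iff_lt, mul_pos_iff]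
    omega

-- A's inner loop is a find?-then-write over the scanned indices
lemma innerA_eq_find (heads : List Int) (i hi : Int) (sibs : List Int) (js : List Int) :
    innerA heads i hi sibs js =
      match js.find? (fun j =>
          decide (0 ≤ hi ∧ 0 ≤ PySem.List.pyGetD heads j 0 ∧
            hi = PySem.List.pyGetD heads j 0 ∧
            (hi - i) * (PySem.List.pyGetD heads j 0 - j) > 0)) with
      | some j =>
          if |hi - i| > |PySem.List.pyGetD heads j 0 - j| then PySem.List.pySetD sibs i j
          else PySem.List.pySetD sibs j i
      | none => sibs := by
  induction js with
  | nil => rfl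
  | cons j js ih =>
    rw [innerA, List.find?_cons]
    by_cases hc : (0 ≤ hi ∧ 0 ≤ PySem.List.pyGetD heads j 0 ∧
        hi = PySem.List.pyGetD heads j 0 ∧
        (hi - i) * (PySem.List.pyGetD heads j 0 - j) > 0)
    · rw [if_pos hc, decide_eq_true hc]
    · rw [if_neg hc, decide_eq_false hc]
      exact ih

lemma find?_congr' {α : Type} (l : List α) (p q : α → Bool) (h : ∀ x ∈ l, p x = q x) :
    l.find? p = l.find? q := by
  induction l with
  | nil => rfl
  | cons x xs ih =>
    rw [List.find?_cons, List.find?_cons, h x (by simp)]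
    cases q x
    · exact ih (fun y hy => h y (by simp [hy]))
    · rfl

lemma firstIdx_step (s : List Int) (m : Int) (k : Int × Bool) (hm : m + 1 ≤ (s.length : Int)) :
    firstIdx s (m + 1) k =
      if keyOf s (m + 1) == some k then some (m + 1) else firstIdx s (m + 2) k := by
  unfold firstIdx
  rw [PySem.List.pyRange_one_cons (by omega), List.find?_cons,
    show (m + 1 + 1 : Int) = m + 2 from by ring]
  cases hkk : (keyOf s (m + 1) == some k) <;> simp

lemma firstIdx_top (s : List Int) (k : Int × Bool) :
    firstIdx s ((s.length : Int) + 1) k = none := by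
  unfold firstIdx
  rw [PySem.List.pyRange_one_eq_nil (by omega)]
  rfl

-- invariant of B's backward pass, by downward induction on the start of the remaining range
lemma pass1_inv (s : List Int) :
    ∀ (d : Nat) (m : Int), 0 ≤ m → m ≤ (s.length : Int) → d = ((s.length : Int) - m).toNat →
      (∀ k, ((PySem.List.pyRange (s.length : Int) m (-1)).foldl (bStep1 s)
          (PySem.Dict.empty, PySem.Dict.empty)).1.get? k = firstIdx s (m + 1) k) ∧
      (∀ i, ((PySem.List.pyRange (s.length : Int) m (-1)).foldl (bStep1 s)
          (PySem.Dict.empty, PySem.Dict.empty)).2.get? i =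
        if m < i ∧ i ≤ (s.length : Int) then (keyOf s i).bind (fun k => firstIdx s (i + 1) k)
        else none) := by
  intro d
  induction d with
  | zero =>
    intro m _ hmn hd
    have hm : m = (s.length : Int) := by omega
    subst hm
    rw [PySem.List.pyRange_neg_one_eq_nil (by omega)]
    constructor
    · intro k; rw [firstIdx_top]; rfl
    · intro i
      rw [if_neg (by omega)]; rfl
  | succ d ih =>
    intro m hm0 hmn hd
    have hsplit : PySem.List.pyRange (s.length : Int) m (-1)
        = PySem.List.pyRange (s.length : Int) (m + 1) (-1) ++ [m + 1] := by
      rw [PySem.List.pyRange_neg_one_eq_reverse, PySem.List.pyRange_neg_one_eq_reverse,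
        PySem.List.pyRange_one_cons (by omega)]
      simp
    obtain ⟨ih1, ih2⟩ := ih (m + 1) (by omega) (by omega) (by omega)
    rw [hsplit, List.foldl_append, List.foldl_cons, List.foldl_nil]
    set st := (PySem.List.pyRange (s.length : Int) (m + 1) (-1)).foldl (bStep1 s)
      (PySem.Dict.empty, PySem.Dict.empty) with hst
    unfold bStep1
    rw [show (m : Int) + 1 - 1 = m from by ring]
    by_cases hc : PySem.List.pyGetD s m 0 < 0 ∨ PySem.List.pyGetD s m 0 = m + 1
    · rw [if_pos hc]
      have hknone : keyOf s (m + 1) = none := by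
        unfold keyOf
        rw [show (m : Int) + 1 - 1 = m from by ring, if_pos hc]
      constructor
      · intro k
        rw [ih1 k, show (m : Int) + 1 + 1 = m + 2 from by ring,
          firstIdx_step s m k (by omega), hknone]
        simp
      · intro i
        by_cases hi : i = m + 1
        · subst hi
          rw [ih2 (m + 1), hknone]
          simp
        · rw [ih2 i]
          by_cases hr : m < i ∧ i ≤ (s.length : Int)
          · rw [if_pos (by omega), if_pos hr]
          · rw [if_neg (by omega), if_neg hr]
    · rw [if_neg hc]
      have hksome : keyOf s (m + 1)
          = some (PySem.List.pyGetD s m 0, decide (PySem.List.pyGetD s m 0 > m + 1)) := by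
        unfold keyOf
        rw [show (m : Int) + 1 - 1 = m from by ring, if_neg hc]
      constructor
      · intro k
        rw [PySem.Dict.get?_insert, ih1 k, show (m : Int) + 1 + 1 = m + 2 from by ring,
          firstIdx_step s m k (by omega), hksome]
        by_cases hk : k = (PySem.List.pyGetD s m 0, decide (PySem.List.pyGetD s m 0 > m + 1))
        · rw [if_pos hk, hk]
          simp
        · rw [if_neg hk]
          have hbeq : ((some (PySem.List.pyGetD s m 0, decide (PySem.List.pyGetD s m 0 > m + 1)) : Option (Int × Bool)) == some k) = false := by
            rw [beq_eq_false_iff_ne]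
            intro h
            exact hk (Option.some.inj h).symm
          rw [hbeq]
          simp
      · intro i
        rw [ih1]
        have hmtch : (match firstIdx s (m + 1 + 1) (PySem.List.pyGetD s m 0, decide (PySem.List.pyGetD s m 0 > m + 1)) with
            | some j => st.2.insert (m + 1) j
            | none => st.2).get? i =
            if i = m + 1 then (keyOf s (m + 1)).bind (fun k => firstIdx s (m + 1 + 1) k)
            else st.2.get? i := by
          rw [hksome]
          simp only [Option.bind_some]
          cases hfi : firstIdx s (m + 1 + 1)
            (PySem.List.pyGetD s m 0, decide (PySem.List.pyGetD s m 0 > m + 1)) with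
          | none =>
            by_cases hi : i = m + 1
            · subst hi
              simp [ih2]
            · rw [if_neg hi]
          | some j =>
            rw [PySem.Dict.get?_insert]
        rw [hmtch]
        by_cases hi : i = m + 1
        · subst hi
          rw [if_pos rfl, if_pos (show m < m + 1 ∧ m + 1 ≤ (s.length : Int) from ⟨by omega, by omega⟩)]
        · rw [if_neg hi, ih2]
          by_cases hr : m < i ∧ i ≤ (s.length : Int)
          · rw [if_pos (by omega), if_pos hr]
          · rw [if_neg (by omega), if_neg hr]

-- the two per-index step functions agree on every index of the outer range
lemma step_agree (s : List Int) (i : Int) (hi1 : 1 ≤ i) (hin : i ≤ (s.length : Int)) (sibs : List Int) :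
    innerA (0 :: s) i (PySem.List.pyGetD (0 :: s) i 0) sibs
        (PySem.List.pyRange (i + 1) ((s.length : Int) + 1) 1) =
      bStep2 s (((PySem.List.pyRange (s.length : Int) 0 (-1)).foldl (bStep1 s)
        (PySem.Dict.empty, PySem.Dict.empty)).2) sibs i := by
  obtain ⟨_, ih2⟩ := pass1_inv s ((s.length : Int) - 0).toNat 0 (by omega) (by omega) rfl
  rw [innerA_eq_find]
  unfold bStep2
  rw [ih2 i, if_pos ⟨by omega, hin⟩]
  have hbr := head_bridge s i hi1
  have hcongr : ∀ j, i + 1 ≤ j → j < (s.length : Int) + 1 →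
      ((0 ≤ PySem.List.pyGetD (0 :: s) i 0 ∧ 0 ≤ PySem.List.pyGetD (0 :: s) j 0 ∧
        PySem.List.pyGetD (0 :: s) i 0 = PySem.List.pyGetD (0 :: s) j 0 ∧
        (PySem.List.pyGetD (0 :: s) i 0 - i) * (PySem.List.pyGetD (0 :: s) j 0 - j) > 0)
        ↔ ∃ k, keyOf s i = some k ∧ keyOf s j = some k) := by
    intro j hj1 hj2
    rw [hbr, head_bridge s j (by omega)]
    unfold keyOf
    exact cond_iff_key (PySem.List.pyGetD s (i - 1) 0) (PySem.List.pyGetD s (j - 1) 0) i j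
  cases hki : keyOf s i with
  | none =>
    have hfind : (PySem.List.pyRange (i + 1) ((s.length : Int) + 1) 1).find? (fun j =>
        decide (0 ≤ PySem.List.pyGetD (0 :: s) i 0 ∧ 0 ≤ PySem.List.pyGetD (0 :: s) j 0 ∧
          PySem.List.pyGetD (0 :: s) i 0 = PySem.List.pyGetD (0 :: s) j 0 ∧
          (PySem.List.pyGetD (0 :: s) i 0 - i) * (PySem.List.pyGetD (0 :: s) j 0 - j) > 0)) = none := by
      rw [List.find?_eq_none]
      intro j hj
      simp only [decide_eq_true_eq]
      intro hcond
      have hjmem := (PySem.List.mem_pyRange_one).1 hj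
      obtain ⟨k, hk1, _⟩ := (hcongr j hjmem.1 hjmem.2).1 hcond
      rw [hki] at hk1; exact absurd hk1 (by simp)
    rw [hfind]
    rfl
  | some k =>
    have hfind : (PySem.List.pyRange (i + 1) ((s.length : Int) + 1) 1).find? (fun j =>
        decide (0 ≤ PySem.List.pyGetD (0 :: s) i 0 ∧ 0 ≤ PySem.List.pyGetD (0 :: s) j 0 ∧
          PySem.List.pyGetD (0 :: s) i 0 = PySem.List.pyGetD (0 :: s) j 0 ∧
          (PySem.List.pyGetD (0 :: s) i 0 - i) * (PySem.List.pyGetD (0 :: s) j 0 - j) > 0))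
        = firstIdx s (i + 1) k := by
      unfold firstIdx
      apply find?_congr'
      intro j hj
      have hjmem := (PySem.List.mem_pyRange_one).1 hj
      have hiffk : (0 ≤ PySem.List.pyGetD (0 :: s) i 0 ∧ 0 ≤ PySem.List.pyGetD (0 :: s) j 0 ∧
          PySem.List.pyGetD (0 :: s) i 0 = PySem.List.pyGetD (0 :: s) j 0 ∧
          (PySem.List.pyGetD (0 :: s) i 0 - i) * (PySem.List.pyGetD (0 :: s) j 0 - j) > 0)
          ↔ (keyOf s j = some k) := by
        rw [hcongr j hjmem.1 hjmem.2, hki]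
        constructor
        · rintro ⟨k', hk1, hk2⟩
          obtain rfl : k = k' := by injection hk1
          exact hk2
        · intro h; exact ⟨k, rfl, h⟩
      by_cases hkj : keyOf s j = some k
      · rw [decide_eq_true (hiffk.2 hkj)]
        exact (beq_iff_eq.mpr hkj).symm
      · rw [decide_eq_false (fun hcnd => hkj (hiffk.1 hcnd))]
        exact (beq_eq_false_iff_ne.mpr hkj).symm
    rw [hfind]
    simp only [Option.bind_some]
    cases hfi : firstIdx s (i + 1) k with
    | none => rfl
    | some j =>
      have hjmem : j ∈ PySem.List.pyRange (i + 1) ((s.length : Int) + 1) 1 :=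
        List.mem_of_find?_eq_some hfi
      have hjr := (PySem.List.mem_pyRange_one).1 hjmem
      have hhj : PySem.List.pyGetD (0 :: s) j 0 = PySem.List.pyGetD s (j - 1) 0 :=
        head_bridge s j (by omega)
      have hkey : keyOf s j = some k := by
        have hb := List.find?_some (by exact hfi)
        cases hkj : keyOf s j with
        | none => rw [hkj] at hb; exact absurd hb (by simp)
        | some k' =>
          rw [hkj] at hb
          have : k' = k := by simpa using hb
          rw [this]
      have hsamei : PySem.List.pyGetD s (i - 1) 0 = k.1 := by
        unfold keyOf at hki
        by_cases hc : PySem.List.pyGetD s (i - 1) 0 < 0 ∨ PySem.List.pyGetD s (i - 1) 0 = i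
        · rw [if_pos hc] at hki; exact absurd hki (by simp)
        · rw [if_neg hc] at hki
          exact congrArg Prod.fst (Option.some.inj hki)
      have hsamej : PySem.List.pyGetD s (j - 1) 0 = k.1 := by
        unfold keyOf at hkey
        by_cases hc : PySem.List.pyGetD s (j - 1) 0 < 0 ∨ PySem.List.pyGetD s (j - 1) 0 = j
        · rw [if_pos hc] at hkey; exact absurd hkey (by simp)
        · rw [if_neg hc] at hkey
          exact congrArg Prod.fst (Option.some.inj hkey)
      dsimp only
      rw [hbr, hhj, hsamei, hsamej]

-- ===== VERDICT (by name: the statement is the Claim_ definition above) =====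
theorem get_sibs_spec : Claim_equal_get_sibs := by
  intro s _
  unfold Spec_get_sibs get_sibs get_sibs_alt
  simp only [List.map_id_fun', id_eq]
  have hlen : (((0 :: s).length : Int)) = (s.length : Int) + 1 := by
    simp
  rw [hlen]
  apply PySem.List.foldl_congr_mem
  intro sibs i hi
  have him := (PySem.List.mem_pyRange_one).1 hi
  exact step_agree s i (by omega) (by omega) sibs
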